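-- pv_equiv track=rewrite | github.com/kononenkoVlad/LAB4 | functions.py | create_condensation_matrix
-- ===== SOURCE A (Python) =====
-- def create_zero_matrix(size):
--     matrix = []
--     for i in range(size):
--         matrix.append([])
--         for j in range(size):
--             matrix[i].append(0)
--     return matrix
--
-- def create_condensation_matrix(components, matrix):
--     components_length = len(components)
--     new_matrix = create_zero_matrix(components_length)
--     for first_component in range(components_length):
--         for second_component in range(components_length):
--             if first_component == second_component:
--                 continue
--             for first_vertex in components[first_component]:
--                 for second_vertex in components[second_component]:
--                     if matrix[first_vertex][second_vertex]:
--                         new_matrix[first_component][second_component] = 1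
--                         break
--     return new_matrix
-- ===== SOURCE B (Python) =====
-- def create_condensation_matrix(components, matrix):
--     # Index-table approach: one vertex->component lookup, then a single edge scan.
--     comp = {}
--     for i, vertices in enumerate(components):
--         for v in vertices:
--             comp[v] = i
--     n = len(components)
--     new_matrix = [[0] * n for _ in range(n)]
--     vertices = list(comp)
--     for u in vertices:
--         for v in vertices:
--             if comp[u] != comp[v] and matrix[u][v]:
--                 new_matrix[comp[u]][comp[v]] = 1
--     return new_matrix
-- ===== Notes on version B (the rewrite author's own statement) =====
-- stated objective: alternative
-- what changed: B builds a vertex-to-component lookup table once and makes a single pass over all vertex pairs setting new_matrix[comp[u]][comp[v]], instead of A's scan of every vertex pair separately for each ordered component pair.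
-- outside the precondition, e.g. on create_condensation_matrix([[0], [0]], [[1]]): A returns [[0, 1], [1, 0]], B returns [[0, 0], [0, 0]]; on create_condensation_matrix([[0], [1, 2]], [[1, 1], [1, 9], [1, 9]]): A returns [[0, 1], [1, 0]], B raises IndexError
import Mathlib
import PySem

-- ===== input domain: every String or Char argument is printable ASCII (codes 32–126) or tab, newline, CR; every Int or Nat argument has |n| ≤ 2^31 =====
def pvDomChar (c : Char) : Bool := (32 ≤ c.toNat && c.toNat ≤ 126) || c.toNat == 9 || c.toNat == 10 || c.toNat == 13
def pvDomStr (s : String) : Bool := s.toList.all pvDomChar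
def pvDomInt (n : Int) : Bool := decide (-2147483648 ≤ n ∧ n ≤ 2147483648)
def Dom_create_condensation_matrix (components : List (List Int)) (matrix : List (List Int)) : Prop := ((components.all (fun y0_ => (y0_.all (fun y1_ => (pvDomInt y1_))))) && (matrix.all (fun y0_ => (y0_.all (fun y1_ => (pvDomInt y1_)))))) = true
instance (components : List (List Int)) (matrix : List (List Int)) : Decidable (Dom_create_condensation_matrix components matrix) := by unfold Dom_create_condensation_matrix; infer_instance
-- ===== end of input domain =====

-- B replaces A's per-component-pair quadruple scan by a vertex→component lookup table plus a
-- single scan over all vertex pairs (objective: alternative decomposition, similar cost).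

-- new_matrix[i][j] = 1  (shared helper: one Python assignment statement)
def pvSetCell (m : List (List Int)) (i j : Int) : List (List Int) :=
  PySem.List.pySetD m i (PySem.List.pySetD (PySem.List.pyGetD m i []) j 1)

-- ===== PORT A =====
def create_zero_matrix (size : Int) : List (List Int) :=
  (PySem.List.pyRange 0 size 1).foldl
    (fun m _ => m ++ [(PySem.List.pyRange 0 size 1).foldl (fun row _ => row ++ [(0 : Int)]) []]) []

def create_condensation_matrix (components : List (List Int)) (matrix : List (List Int)) : List (List Int) :=
  let n : Int := components.length
  (PySem.List.pyRange 0 n 1).foldl (fun nm i =>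
    (PySem.List.pyRange 0 n 1).foldl (fun nm j =>
      if i = j then nm
      else
        -- for first_vertex …: for second_vertex …: if edge: set cell; break
        (PySem.List.pyGetD components i []).foldl (fun nm u =>
          if (PySem.List.pyGetD components j []).any
               (fun v => PySem.List.pyGetD (PySem.List.pyGetD matrix u []) v 0 ≠ 0)
          then pvSetCell nm i j else nm) nm) nm)
    (create_zero_matrix n)

-- ===== PORT B =====
-- comp[v] = index of the component containing v
def pvBuildComp (components : List (List Int)) : PySem.Dict Int Int :=
  (PySem.List.enumerate components 0).foldl
    (fun d p => p.2.foldl (fun d v => d.insert v p.1) d) PySem.Dict.empty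

def create_condensation_matrix_alt (components : List (List Int)) (matrix : List (List Int)) : List (List Int) :=
  let comp := pvBuildComp components
  let n := components.length
  let nm0 := (List.range n).map (fun _ => List.replicate n (0 : Int))
  let verts := comp.keys
  verts.foldl (fun nm u =>
    verts.foldl (fun nm v =>
      if comp.getD u 0 ≠ comp.getD v 0 ∧ PySem.List.pyGetD (PySem.List.pyGetD matrix u []) v 0 ≠ 0
      then pvSetCell nm (comp.getD u 0) (comp.getD v 0) else nm) nm) nm0

-- ===== PRECONDITION & SPEC =====
-- Pre_ excludes inputs where Python A raises IndexError (a vertex indexing outside the adjacency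
-- matrix while at least two components are nonempty) and, beyond that, two shapes A can still
-- return on, where B's own scan raises or differs: ragged/short matrix rows whose out-of-range
-- entries only A's break skips, and vertex lists repeating a vertex across components, where A's
-- double scan of the overlap is accidental — components are assumed to partition the vertex set.
def Pre_create_condensation_matrix (components : List (List Int)) (matrix : List (List Int)) : Prop :=
  components.flatten.Nodup ∧
  (2 ≤ (components.filter (fun c => !c.isEmpty)).length →
    ∀ u ∈ components.flatten, PySem.Raise.InRange matrix.length u ∧
      ∀ v ∈ components.flatten, PySem.Raise.InRange (PySem.List.pyGetD matrix u []).length v)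
instance (components : List (List Int)) (matrix : List (List Int)) : Decidable (Pre_create_condensation_matrix components matrix) := by unfold Pre_create_condensation_matrix; infer_instance

def pvWitness_create_condensation_matrix : List (List Int) × List (List Int) :=
  ([[0], [1]], [[0, 1], [1, 0]])

def Spec_create_condensation_matrix (components : List (List Int)) (matrix : List (List Int)) (out : List (List Int)) : Prop := out = create_condensation_matrix_alt components matrix
instance (components : List (List Int)) (matrix : List (List Int)) (out : List (List Int)) : Decidable (Spec_create_condensation_matrix components matrix out) := by unfold Spec_create_condensation_matrix; infer_instance

-- ===== CLAIM (what is proved, stated in full; the proofs are below) =====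
def Claim_equal_create_condensation_matrix : Prop := ∀ (components : List (List Int)) (matrix : List (List Int)), Dom_create_condensation_matrix components matrix → Pre_create_condensation_matrix components matrix → Spec_create_condensation_matrix components matrix (create_condensation_matrix components matrix)

-- ===== LEMMAS AND PROOFS =====

-- Nat-indexed views of the cell operations
def pvShape (n : Nat) (m : List (List Int)) : Prop := m.length = n ∧ ∀ row ∈ m, row.length = n
def pvGetCell (m : List (List Int)) (i j : Nat) : Int := (m.getD i []).getD j 0
def pvSetCellN (m : List (List Int)) (i j : Nat) : List (List Int) := m.set i ((m.getD i []).set j 1)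

theorem pvSetCell_cast (m : List (List Int)) (i j : Nat) :
    pvSetCell m (i : Int) (j : Int) = pvSetCellN m i j := by
  simp [pvSetCell, pvSetCellN]

theorem pvShape_setCellN {n : Nat} {m : List (List Int)} (hm : pvShape n m) (i j : Nat) :
    pvShape n (pvSetCellN m i j) := by
  obtain ⟨hlen, hrows⟩ := hm
  by_cases hi : i < m.length
  · refine ⟨by simp [pvSetCellN, hlen], ?_⟩
    intro row hrow
    rcases List.mem_or_eq_of_mem_set hrow with h | h
    · exact hrows _ h
    · subst h
      have : m.getD i [] = m[i] := by
        simp [List.getD_eq_getElem?_getD, List.getElem?_eq_getElem hi]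
      simp [List.getElem?_eq_getElem hi, hrows _ (List.getElem_mem hi)]
  · constructor <;>
      simp_all [pvSetCellN, List.set_eq_of_length_le (by omega : m.length ≤ i)]

theorem pvGetCell_setCellN {n : Nat} {m : List (List Int)} (hm : pvShape n m)
    {i j : Nat} (hi : i < n) (hj : j < n) (i' j' : Nat) :
    pvGetCell (pvSetCellN m i j) i' j' = if i' = i ∧ j' = j then 1 else pvGetCell m i' j' := by
  obtain ⟨hlen, hrows⟩ := hm
  have hi' : i < m.length := by omega
  have hrowlen : m[i].length = n := hrows _ (List.getElem_mem hi')
  by_cases h1 : i' = i <;> by_cases h2 : j' = j <;>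
    simp_all [pvGetCell, pvSetCellN, List.getD_eq_getElem?_getD, List.getElem?_set, eq_comm]

-- generic token fold: shape preservation and cellwise value
theorem pvFold_shape {α : Type} {n : Nat} (ts : List α) (C : α → Bool) (f g : α → Nat)
    {m : List (List Int)} (hm : pvShape n m) :
    pvShape n (ts.foldl (fun m t => if C t then pvSetCellN m (f t) (g t) else m) m) := by
  induction ts generalizing m with
  | nil => exact hm
  | cons t ts ih =>
    rw [List.foldl_cons]
    apply ih
    split
    · exact pvShape_setCellN hm _ _
    · exact hm

theorem pvFold_entry {α : Type} {n : Nat} (ts : List α) (C : α → Bool) (f g : α → Nat)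
    (hf : ∀ t ∈ ts, f t < n ∧ g t < n)
    {m : List (List Int)} (hm : pvShape n m) (i j : Nat) :
    pvGetCell (ts.foldl (fun m t => if C t then pvSetCellN m (f t) (g t) else m) m) i j
      = if ts.any (fun t => C t && (f t == i) && (g t == j)) then 1
        else pvGetCell m i j := by
  induction ts generalizing m with
  | nil => simp
  | cons t ts ih =>
    have hft := hf t (by simp)
    rw [List.foldl_cons]
    by_cases hC : C t
    · rw [if_pos hC,
        ih (fun t ht => hf t (by simp [ht])) (pvShape_setCellN hm _ _),
        pvGetCell_setCellN hm hft.1 hft.2]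
      by_cases hA : ts.any (fun t => C t && (f t == i) && (g t == j))
      · simp [hA]
      · by_cases hp : i = f t ∧ j = g t
        · simp [hC, hp.1, hp.2]
        · have : ¬ (f t = i ∧ g t = j) := fun h => hp ⟨h.1.symm, h.2.symm⟩
          have hb : (f t == i && g t == j) = false := by
            rcases Decidable.not_and_iff_not_or_not.mp this with h | h <;> simp [h]
          simp [hA, hC, hp, hb]
    · rw [if_neg hC, ih (fun t ht => hf t (by simp [ht])) hm]
      simp [hC]

theorem pvFoldl_foldl {α β γ : Type} (g : γ → α → β → γ) (xs : List α) (ys : α → List β)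
    (init : γ) :
    xs.foldl (fun c x => (ys x).foldl (fun c y => g c x y) c) init
      = (xs.flatMap (fun x => (ys x).map (fun y => (x, y)))).foldl (fun c t => g c t.1 t.2) init := by
  induction xs generalizing init with
  | nil => rfl
  | cons x xs ih => simp [List.foldl_append, List.foldl_map, ih]

theorem pvZero_eq (n : Nat) :
    create_zero_matrix (n : Int) = List.replicate n (List.replicate n (0 : Int)) := by
  have key : ∀ {β : Type} (l : List Int) (c : β) (acc : List β),
      l.foldl (fun a _ => a ++ [c]) acc = acc ++ List.replicate l.length c := by
    intro β l c
    induction l with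
    | nil => simp
    | cons x l ih => intro acc; simp [ih, List.replicate_succ]
  have hlen : (PySem.List.pyRange 0 (n : Int) 1).length = n := by
    simp [PySem.List.length_pyRange_one]
  rw [create_zero_matrix, key, key, hlen]
  simp

-- conditional-set fold over one cell collapses to a single conditional set
theorem pvSetCellN_idem (m : List (List Int)) (i j : Nat) :
    pvSetCellN (pvSetCellN m i j) i j = pvSetCellN m i j := by
  by_cases hi : i < m.length
  · simp [pvSetCellN, List.getD_eq_getElem?_getD, hi, List.set_set]
  · simp [pvSetCellN, List.set_eq_of_length_le (by omega : m.length ≤ i)]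

theorem pvFoldIf (us : List Int) (q : Int → Bool) (m : List (List Int)) (i j : Nat) :
    us.foldl (fun m u => if q u then pvSetCellN m i j else m) m
      = if us.any q then pvSetCellN m i j else m := by
  induction us generalizing m with
  | nil => simp
  | cons u us ih =>
    rw [List.foldl_cons, ih]
    by_cases hq : q u
    · by_cases hA : us.any q <;> simp [hq, hA, pvSetCellN_idem]
    · simp [hq]

-- A as a single fold over Nat index pairs
def pvTokA (n : Nat) : List (Nat × Nat) :=
  (List.range n).flatMap (fun a => (List.range n).map (fun b => (a, b)))

def pvCondA (components matrix : List (List Int)) (a b : Nat) : Bool :=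
  decide (a ≠ b) &&
    (components.getD a []).any (fun u => (components.getD b []).any
      (fun v => PySem.List.pyGetD (PySem.List.pyGetD matrix u []) v 0 ≠ 0))

theorem A_eq (components matrix : List (List Int)) :
    create_condensation_matrix components matrix
      = (pvTokA components.length).foldl
          (fun nm t => if pvCondA components matrix t.1 t.2 then pvSetCellN nm t.1 t.2 else nm)
          (List.replicate components.length (List.replicate components.length 0)) := by
  simp only [create_condensation_matrix, PySem.List.pyRange_zero_nat, List.foldl_map,
    PySem.List.pyGetD_natCast, pvSetCell_cast, pvZero_eq]
  have step : ∀ (a b : ℕ) (nm : List (List Int)),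
      (if (a : Int) = (b : Int) then nm
       else (components.getD a []).foldl (fun nm u =>
         if ((components.getD b []).any fun v =>
              decide (PySem.List.pyGetD (PySem.List.pyGetD matrix u []) v 0 ≠ 0)) = true
         then pvSetCellN nm a b else nm) nm)
      = if pvCondA components matrix a b then pvSetCellN nm a b else nm := by
    intro a b nm
    rw [pvFoldIf]
    by_cases hab : a = b
    · simp [hab, pvCondA]
    · have : ¬ ((a : Int) = (b : Int)) := by exact_mod_cast hab
      by_cases hA : (components.getD a []).any fun u =>
          (components.getD b []).any fun v =>
            decide (PySem.List.pyGetD (PySem.List.pyGetD matrix u []) v 0 ≠ 0) <;>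
        simp [this, hab, pvCondA]
  simp only [step]
  rw [pvFoldl_foldl (fun nm (a b : ℕ) =>
    if pvCondA components matrix a b then pvSetCellN nm a b else nm)]
  rfl

-- the vertex→component dictionary, characterised
theorem comp_items (components : List (List Int)) (hnd : components.flatten.Nodup) :
    (pvBuildComp components).items
      = (PySem.List.enumerate components 0).flatMap (fun p => p.2.map (fun v => (v, p.1))) := by
  have hmapsnd : (List.flatMap (fun x : Int × List Int => List.map (fun y => (x, y)) x.2)
      (PySem.List.enumerate components 0)).map (fun t => t.2) = components.flatten := by
    simp only [List.map_flatMap, List.map_map, Function.comp_def]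
    rw [← PySem.List.map_snd_enumerate components 0]
    simp [List.flatMap_def]
  rw [pvBuildComp, pvFoldl_foldl (fun (d : PySem.Dict Int Int) (p : Int × List Int) (v : Int) => d.insert v p.1) (PySem.List.enumerate components 0) (fun p => p.2) PySem.Dict.empty]
  rw [PySem.Dict.items_foldl_insert_fresh
    (List.flatMap (fun x : Int × List Int => List.map (fun y => (x, y)) x.2)
      (PySem.List.enumerate components 0))
    (fun t => t.2) (fun t => t.1.1) PySem.Dict.empty (by intro a _; simp)
    (by rw [hmapsnd]; exact hnd)]
  simp [List.map_flatMap, Function.comp_def, PySem.Dict.empty]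

theorem comp_keys (components : List (List Int)) (hnd : components.flatten.Nodup) :
    (pvBuildComp components).keys = components.flatten := by
  have h := comp_items components hnd
  simp only [PySem.Dict.keys, h, List.map_flatMap, Function.comp_def, List.map_map]
  simp only [List.map_id']
  rw [← PySem.List.map_snd_enumerate components 0]
  simp [List.flatMap_def]

theorem comp_getD (components : List (List Int)) (hnd : components.flatten.Nodup)
    {k : Nat} (hk : k < components.length) {u : Int} (hu : u ∈ components[k]) :
    (pvBuildComp components).getD u 0 = (k : Int) := by
  apply PySem.Dict.getD_of_mem_items
  · rw [comp_items components hnd]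
    rw [List.mem_flatMap]
    refine ⟨((k : Int), components[k]), ?_, List.mem_map.mpr ⟨u, hu, rfl⟩⟩
    rw [PySem.List.enumerate_eq_map_pyRange components []]
    rw [List.mem_map]
    refine ⟨(k : Int), ?_, ?_⟩
    · rw [PySem.List.mem_pyRange_one]
      refine ⟨by positivity, ?_⟩
      simp only [PySem.List.len_eq]
      exact_mod_cast hk
    · simp [List.getD_eq_getElem?_getD, List.getElem?_eq_getElem hk]
  · rw [comp_keys components hnd]; exact hnd

theorem mem_flatten_getD (components : List (List Int)) (hnd : components.flatten.Nodup)
    {u : Int} (hu : u ∈ components.flatten) :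
    ∃ (k : Nat) (hk : k < components.length), u ∈ components[k] ∧
      (pvBuildComp components).getD u 0 = (k : Int) := by
  obtain ⟨l, hl, hul⟩ := List.mem_flatten.mp hu
  obtain ⟨k, hk, hkl⟩ := List.mem_iff_getElem.mp hl
  exact ⟨k, hk, hkl ▸ hul, comp_getD components hnd hk (hkl ▸ hul)⟩

theorem pvSetCell_toNat (m : List (List Int)) {c1 c2 : Int} (h1 : 0 ≤ c1) (h2 : 0 ≤ c2) :
    pvSetCell m c1 c2 = pvSetCellN m c1.toNat c2.toNat := by
  conv_lhs => rw [show c1 = ((c1.toNat : Nat) : Int) from (Int.toNat_of_nonneg h1).symm,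
    show c2 = ((c2.toNat : Nat) : Int) from (Int.toNat_of_nonneg h2).symm]
  exact pvSetCell_cast m c1.toNat c2.toNat

-- B as a single fold over vertex pairs
def pvTokB (components : List (List Int)) : List (Int × Int) :=
  components.flatten.flatMap (fun u => components.flatten.map (fun v => (u, v)))

def pvCondB (components matrix : List (List Int)) (t : Int × Int) : Bool :=
  decide ((pvBuildComp components).getD t.1 0 ≠ (pvBuildComp components).getD t.2 0 ∧
    PySem.List.pyGetD (PySem.List.pyGetD matrix t.1 []) t.2 0 ≠ 0)

theorem tokB_mem (components : List (List Int)) {t : Int × Int} (ht : t ∈ pvTokB components) :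
    t.1 ∈ components.flatten ∧ t.2 ∈ components.flatten := by
  obtain ⟨u, hu, hv⟩ := List.mem_flatMap.mp ht
  obtain ⟨v, hv', rfl⟩ := List.mem_map.mp hv
  exact ⟨hu, hv'⟩

theorem B_eq (components matrix : List (List Int)) (hnd : components.flatten.Nodup) :
    create_condensation_matrix_alt components matrix
      = (pvTokB components).foldl
          (fun nm t => if pvCondB components matrix t then
              pvSetCellN nm ((pvBuildComp components).getD t.1 0).toNat
                ((pvBuildComp components).getD t.2 0).toNat
            else nm)
          (List.replicate components.length (List.replicate components.length 0)) := by
  have hnm0 : (List.range components.length).map (fun _ => List.replicate components.length (0 : Int))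
      = List.replicate components.length (List.replicate components.length 0) := by
    simp [List.map_const']
  simp only [create_condensation_matrix_alt, comp_keys components hnd, hnm0]
  rw [pvFoldl_foldl (fun (nm : List (List Int)) (u v : Int) =>
      if (pvBuildComp components).getD u 0 ≠ (pvBuildComp components).getD v 0 ∧
          PySem.List.pyGetD (PySem.List.pyGetD matrix u []) v 0 ≠ 0
      then pvSetCell nm ((pvBuildComp components).getD u 0) ((pvBuildComp components).getD v 0)
      else nm)
    components.flatten (fun _ => components.flatten)]
  apply PySem.List.foldl_congr_mem
  intro nm t ht
  obtain ⟨hu, hv⟩ := tokB_mem components ht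
  obtain ⟨k1, hk1, _, hc1⟩ := mem_flatten_getD components hnd hu
  obtain ⟨k2, hk2, _, hc2⟩ := mem_flatten_getD components hnd hv
  by_cases hc : (pvBuildComp components).getD t.1 0 ≠ (pvBuildComp components).getD t.2 0 ∧
      PySem.List.pyGetD (PySem.List.pyGetD matrix t.1 []) t.2 0 ≠ 0
  · rw [if_pos hc, if_pos (by simpa [pvCondB] using hc),
      pvSetCell_toNat _ (by omega) (by omega)]
  · rw [if_neg hc, if_neg (by simpa [pvCondB] using hc)]

theorem anyA_eq (components matrix : List (List Int)) {i j : Nat}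
    (hi : i < components.length) (hj : j < components.length) :
    ((pvTokA components.length).any
        (fun t => pvCondA components matrix t.1 t.2 && (t.1 == i) && (t.2 == j)))
      = pvCondA components matrix i j := by
  rw [Bool.eq_iff_iff]
  constructor
  · intro h
    obtain ⟨t, _, hc⟩ := List.any_eq_true.mp h
    simp only [Bool.and_eq_true, beq_iff_eq] at hc
    obtain ⟨⟨hc, h1⟩, h2⟩ := hc
    rwa [← h1, ← h2]
  · intro h
    refine List.any_eq_true.mpr ⟨(i, j), ?_, by simp [h]⟩
    simp only [pvTokA, List.mem_flatMap, List.mem_map, List.mem_range]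
    exact ⟨i, hi, ⟨j, hj, rfl⟩⟩

theorem anyB_eq (components matrix : List (List Int)) (hnd : components.flatten.Nodup)
    {i j : Nat} (hi : i < components.length) (hj : j < components.length) :
    ((pvTokB components).any
        (fun t => pvCondB components matrix t
          && (((pvBuildComp components).getD t.1 0).toNat == i)
          && (((pvBuildComp components).getD t.2 0).toNat == j)))
      = pvCondA components matrix i j := by
  have hgi : components.getD i [] = components[i] := by
    simp [List.getD_eq_getElem?_getD, List.getElem?_eq_getElem hi]
  have hgj : components.getD j [] = components[j] := by
    simp [List.getD_eq_getElem?_getD, List.getElem?_eq_getElem hj]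
  rw [Bool.eq_iff_iff]
  constructor
  · intro h
    obtain ⟨t, ht, hc⟩ := List.any_eq_true.mp h
    obtain ⟨hu, hv⟩ := tokB_mem components ht
    obtain ⟨k1, hk1, hmem1, hc1⟩ := mem_flatten_getD components hnd hu
    obtain ⟨k2, hk2, hmem2, hc2⟩ := mem_flatten_getD components hnd hv
    simp only [Bool.and_eq_true, beq_iff_eq, pvCondB, decide_eq_true_eq, hc1, hc2,
      Int.toNat_natCast] at hc
    obtain ⟨⟨⟨hne, hedge⟩, h1⟩, h2⟩ := hc
    subst h1; subst h2
    simp only [pvCondA, Bool.and_eq_true, decide_eq_true_eq, List.any_eq_true, hgi, hgj]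
    exact ⟨by exact_mod_cast hne, t.1, hmem1, t.2, hmem2, by simpa using hedge⟩
  · intro h
    simp only [pvCondA, Bool.and_eq_true, decide_eq_true_eq, List.any_eq_true, hgi, hgj] at h
    obtain ⟨hne, u, hu, v, hv, hedge⟩ := h
    refine List.any_eq_true.mpr ⟨(u, v), ?_, ?_⟩
    · simp only [pvTokB, List.mem_flatMap, List.mem_map]
      exact ⟨u, List.mem_flatten.mpr ⟨components[i], List.getElem_mem hi, hu⟩,
        v, List.mem_flatten.mpr ⟨components[j], List.getElem_mem hj, hv⟩, rfl⟩
    · have hcu := comp_getD components hnd hi hu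
      have hcv := comp_getD components hnd hj hv
      simp only [Bool.and_eq_true, beq_iff_eq, pvCondB, decide_eq_true_eq, hcu, hcv,
        Int.toNat_natCast]
      exact ⟨⟨⟨by exact_mod_cast hne, by simpa using hedge⟩, trivial⟩, trivial⟩

-- ===== VERDICT (by name: the statement is the Claim_ definition above) =====
theorem create_condensation_matrix_spec : Claim_equal_create_condensation_matrix := by
  intro components matrix _ hpre
  obtain ⟨hnd, -⟩ := hpre
  unfold Spec_create_condensation_matrix
  have hzero : pvShape components.length
      (List.replicate components.length (List.replicate components.length (0 : Int))) := by
    refine ⟨by simp, ?_⟩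
    intro row hrow
    simp [List.eq_of_mem_replicate hrow]
  have hfA : ∀ t ∈ pvTokA components.length,
      t.1 < components.length ∧ t.2 < components.length := by
    intro t ht
    simp only [pvTokA, List.mem_flatMap, List.mem_map, List.mem_range] at ht
    obtain ⟨a, ha, b, hb, rfl⟩ := ht
    exact ⟨ha, hb⟩
  have hfB : ∀ t ∈ pvTokB components,
      ((pvBuildComp components).getD t.1 0).toNat < components.length ∧
      ((pvBuildComp components).getD t.2 0).toNat < components.length := by
    intro t ht
    obtain ⟨hu, hv⟩ := tokB_mem components ht
    obtain ⟨k1, hk1, -, hc1⟩ := mem_flatten_getD components hnd hu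
    obtain ⟨k2, hk2, -, hc2⟩ := mem_flatten_getD components hnd hv
    rw [hc1, hc2]
    simpa using ⟨hk1, hk2⟩
  rw [A_eq components matrix, B_eq components matrix hnd]
  have hSA := pvFold_shape (n := components.length) (pvTokA components.length)
    (fun t => pvCondA components matrix t.1 t.2) (fun t => t.1) (fun t => t.2) hzero
  have hSB := pvFold_shape (n := components.length) (pvTokB components)
    (pvCondB components matrix) (fun t => ((pvBuildComp components).getD t.1 0).toNat)
    (fun t => ((pvBuildComp components).getD t.2 0).toNat) hzero
  apply List.ext_getElem (by rw [hSA.1, hSB.1])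
  intro i h1 h2
  have hi : i < components.length := by rw [← hSA.1]; exact h1
  apply List.ext_getElem (by rw [hSA.2 _ (List.getElem_mem h1), hSB.2 _ (List.getElem_mem h2)])
  intro j hj1 hj2
  have hj : j < components.length := by rw [← hSA.2 _ (List.getElem_mem h1)]; exact hj1
  have eA : ∀ (m : List (List Int)) (hx : i < m.length) (hy : j < (m[i]).length),
      m[i][j] = pvGetCell m i j := by
    intro m hx hy
    simp [pvGetCell, List.getD_eq_getElem?_getD, List.getElem?_eq_getElem hx,
      List.getElem?_eq_getElem hy]
  rw [eA _ h1 hj1, eA _ h2 hj2,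
    pvFold_entry (pvTokA components.length)
      (fun t => pvCondA components matrix t.1 t.2) (fun t => t.1) (fun t => t.2) hfA hzero i j,
    pvFold_entry (pvTokB components) (pvCondB components matrix)
      (fun t => ((pvBuildComp components).getD t.1 0).toNat)
      (fun t => ((pvBuildComp components).getD t.2 0).toNat) hfB hzero i j,
    anyA_eq components matrix hi hj, anyB_eq components matrix hnd hi hj]
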